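-- pv_equiv track=rewrite | github.com/TurkuNLP/LLM_document_descriptors | trace_merges/trace_merges.py | find_root_inputs
-- ===== SOURCE A (Python) =====
-- from typing import Dict, Set, List, Any, Tuple, Iterable, Optional
--
-- def find_root_inputs(
--     id_to_trace: str,
--     sources_map: Dict[str, Set[str]],
--     memo: Optional[Dict[str, Set[str]]] = None,
--     path_guard: Optional[Set[str]] = None,
-- ) -> Set[str]:
--     """
--     Recursively find all root input IDs that contributed to the given ID.
--     Uses memoization and a simple cycle guard.
--     """
--     if memo is None:
--         memo = {}
--     if path_guard is None:
--         path_guard = set()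
--
--     if id_to_trace in memo:
--         return memo[id_to_trace]
--
--     # cycle guard
--     if id_to_trace in path_guard:
--         # Cycle detected; treat this node as a leaf to avoid infinite recursion.
--         # You may also choose to log/raise. We degrade gracefully here.
--         memo[id_to_trace] = {id_to_trace}
--         return memo[id_to_trace]
--     path_guard.add(id_to_trace)
--
--     # If this ID doesn't have sources in our map, it is a root input
--     if id_to_trace not in sources_map or not sources_map[id_to_trace]:
--         memo[id_to_trace] = {id_to_trace}
--         path_guard.remove(id_to_trace)
--         return memo[id_to_trace]
--
--     # Recursively trace back all sources
--     all_roots = set()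
--     for source_id in sources_map[id_to_trace]:
--         all_roots.update(find_root_inputs(source_id, sources_map, memo, path_guard))
--
--     memo[id_to_trace] = all_roots
--     path_guard.remove(id_to_trace)
--     return all_roots
-- ===== SOURCE B (Python) =====
-- # Iterative re-implementation: an explicit stack machine (post-order traversal with
-- # visit/fold frames) replaces A's recursion. Note: like A, this mutates memo and
-- # path_guard in place; the equivalence claimed is about the RETURN value only.
-- def find_root_inputs(
--     id_to_trace,
--     sources_map,
--     memo=None,
--     path_guard=None,
-- ):
--     if memo is None:
--         memo = {}
--     if path_guard is None:
--         path_guard = set()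
--
--     stack = [("visit", id_to_trace, None, None)]
--     res = set()
--     while stack:
--         kind, node, srcs_list, acc = stack.pop()
--         if kind == "visit":
--             if node in memo:
--                 res = memo[node]
--             elif node in path_guard:
--                 memo[node] = {node}
--                 res = {node}
--             else:
--                 srcs = sources_map.get(node)
--                 if not srcs:
--                     memo[node] = {node}
--                     res = {node}
--                 else:
--                     srcs_list = list(srcs)
--                     path_guard.add(node)
--                     stack.append(("fold", node, srcs_list[1:], set()))
--                     stack.append(("visit", srcs_list[0], None, None))
--         else:  # fold: union the child's result, then continue with remaining sources
--             acc = acc | res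
--             if not srcs_list:
--                 memo[node] = acc
--                 path_guard.remove(node)
--                 res = acc
--             else:
--                 stack.append(("fold", node, srcs_list[1:], acc))
--                 stack.append(("visit", srcs_list[0], None, None))
--     return res
-- ===== Notes on version B (the rewrite author's own statement) =====
-- stated objective: alternative
-- what changed: Replaces A's recursive DFS by an iterative post-order stack machine with explicit visit/fold frames (memo and path-guard kept as in A); same asymptotic cost, no Python recursion.
import Mathlib
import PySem

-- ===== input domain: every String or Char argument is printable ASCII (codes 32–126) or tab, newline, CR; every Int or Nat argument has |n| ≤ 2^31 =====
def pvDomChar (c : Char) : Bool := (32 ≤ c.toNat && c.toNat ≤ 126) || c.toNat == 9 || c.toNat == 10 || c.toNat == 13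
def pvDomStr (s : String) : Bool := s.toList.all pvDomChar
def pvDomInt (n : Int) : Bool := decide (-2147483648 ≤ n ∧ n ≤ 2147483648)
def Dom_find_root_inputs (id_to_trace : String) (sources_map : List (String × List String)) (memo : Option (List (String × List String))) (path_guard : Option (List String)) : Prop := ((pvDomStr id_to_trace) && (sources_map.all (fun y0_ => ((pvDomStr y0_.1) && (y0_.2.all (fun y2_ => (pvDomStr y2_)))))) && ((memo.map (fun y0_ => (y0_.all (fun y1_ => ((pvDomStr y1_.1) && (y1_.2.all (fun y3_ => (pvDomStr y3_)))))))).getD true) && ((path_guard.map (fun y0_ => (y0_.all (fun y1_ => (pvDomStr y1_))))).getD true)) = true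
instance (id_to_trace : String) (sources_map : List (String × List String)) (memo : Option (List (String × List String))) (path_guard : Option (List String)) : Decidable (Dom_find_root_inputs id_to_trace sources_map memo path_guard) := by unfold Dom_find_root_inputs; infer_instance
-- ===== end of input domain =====

-- B replaces A's recursion by an explicit stack machine (post-order visit/fold frames);
-- both Pythons mutate memo/path_guard in place — the equivalence claimed is about the RETURN value only.

-- ===== PORT A =====
-- A is recursive; the Nat argument is a fuel/totality device only: started at
-- sources_map.length + 1 it can never run out (each descent adds a fresh key of
-- sources_map to the path guard), so the fuel-0 branch is unreachable at the entry point.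
mutual
  -- one recursive call of A: returns (result, memo, path_guard)
  def pvTraceA (sm : PySem.Dict String (List String)) (f : Nat) (id : String)
      (m : PySem.Dict String (List String)) (g : PySem.Set String) :
      List String × PySem.Dict String (List String) × PySem.Set String :=
    match m.get? id with
    | some v => (v, m, g)                                      -- if id_to_trace in memo
    | none =>
      if PySem.Set.contains g id then                           -- cycle guard
        ([id], m.insert id [id], g)
      else
        let g1 := PySem.Set.add g id                            -- path_guard.add(id_to_trace)
        match sm.get? id with
        | none => ([id], m.insert id [id], PySem.Set.discard g1 id)   -- root input (set.remove of a present element = discard)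
        | some srcs =>
          if srcs.isEmpty then ([id], m.insert id [id], PySem.Set.discard g1 id)
          else
            match f with
            | 0 => ([], m, g)                                   -- fuel exhausted: unreachable from the initial fuel
            | f' + 1 =>
              let t := pvTraceListA sm f' srcs [] m g1          -- the for-loop over sources
              (t.1, t.2.1.insert id t.1, PySem.Set.discard t.2.2 id)
  termination_by (f, 0)

  -- the 'for source_id in sources_map[id]: all_roots.update(...)' loop
  def pvTraceListA (sm : PySem.Dict String (List String)) (f : Nat) (srcs : List String)
      (acc : List String) (m : PySem.Dict String (List String)) (g : PySem.Set String) :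
      List String × PySem.Dict String (List String) × PySem.Set String :=
    match srcs with
    | [] => (acc, m, g)
    | s :: rest =>
      let t := pvTraceA sm f s m g
      pvTraceListA sm f rest (PySem.Set.update acc t.1) t.2.1 t.2.2
  termination_by (f, srcs.length + 1)
end

def find_root_inputs (id_to_trace : String) (sources_map : List (String × List String)) (memo : Option (List (String × List String))) (path_guard : Option (List String)) : List String :=
  (pvTraceA (PySem.Dict.mk sources_map) (sources_map.length + 1) id_to_trace
    (PySem.Dict.mk (memo.getD [])) (path_guard.getD [])).1

-- ===== PORT B =====
-- B: explicit stack of frames; 'visit f id' asks for id's root set ('f' is the same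
-- fuel/totality device as in A's port), 'fold f id rem acc' unions the last result into
-- acc and continues with the remaining sources rem of id.
inductive PvFrame : Type
  | visit : Nat → String → PvFrame
  | fold : Nat → String → List String → List String → PvFrame
deriving DecidableEq, Repr

def pvMaxSrcLen (sm : PySem.Dict String (List String)) : Nat :=
  sm.items.foldr (fun p a => max p.2.length a) 0

def pvFrameWeight (C : Nat) : PvFrame → Nat
  | .visit f _ => (C + 2) ^ (f + 1)
  | .fold f _ rem _ => (rem.length + 1) * ((C + 2) ^ (f + 1) + 1)

-- termination helper for the machine: a looked-up source list is at most pvMaxSrcLen long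
theorem pvGetLenLe (sm : PySem.Dict String (List String)) (id : String) (srcs : List String)
    (h : sm.get? id = some srcs) : srcs.length ≤ pvMaxSrcLen sm := by
  obtain ⟨items⟩ := sm
  simp only [PySem.Dict.get?, pvMaxSrcLen] at *
  induction items with
  | nil => simp [List.find?] at h
  | cons p rest ih =>
    by_cases hp : (p.1 == id) = true
    · simp [List.find?, hp] at h
      simp [← h]
    · simp only [List.find?, hp] at h
      simp only [List.foldr]
      exact le_trans (ih h) (Nat.le_max_right _ _)

def pvRunB (sm : PySem.Dict String (List String)) (stack : List PvFrame) (res : List String)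
    (m : PySem.Dict String (List String)) (g : PySem.Set String) :
    List String × PySem.Dict String (List String) × PySem.Set String :=
  match stack with
  | [] => (res, m, g)
  | .visit f id :: st =>
    match m.get? id with
    | some v => pvRunB sm st v m g
    | none =>
      if PySem.Set.contains g id then pvRunB sm st [id] (m.insert id [id]) g
      else
        match h : sm.get? id with
        | none => pvRunB sm st [id] (m.insert id [id]) g
        | some [] => pvRunB sm st [id] (m.insert id [id]) g
        | some (s :: rem) =>
          match f with
          | 0 => pvRunB sm st [] m g     -- fuel exhausted: unreachable from the initial fuel
          | f' + 1 =>
            pvRunB sm (.visit f' s :: .fold f' id rem [] :: st) res m (PySem.Set.add g id)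
  | .fold f id rem acc :: st =>
    let acc' := PySem.Set.update acc res
    match rem with
    | [] => pvRunB sm st acc' (m.insert id acc') (PySem.Set.discard g id)
    | s :: rem' => pvRunB sm (.visit f s :: .fold f id rem' acc' :: st) res m g
termination_by (stack.map (pvFrameWeight (pvMaxSrcLen sm))).sum
decreasing_by
  all_goals simp only [List.map_cons, List.sum_cons, pvFrameWeight, List.length_cons]
  · exact Nat.lt_add_of_pos_left (by positivity)
  · exact Nat.lt_add_of_pos_left (by positivity)
  · exact Nat.lt_add_of_pos_left (by positivity)
  · exact Nat.lt_add_of_pos_left (by positivity)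
  · exact Nat.lt_add_of_pos_left (by positivity)
  · -- the expansion step: one visit frame at fuel f'+1 becomes a visit and a fold frame at fuel f'
    have hlen : rem.length + 1 ≤ pvMaxSrcLen sm := by
      simpa using pvGetLenLe sm id (s :: rem) h
    have hX : (pvMaxSrcLen sm + 2) ≤ (pvMaxSrcLen sm + 2) ^ (f' + 1) :=
      Nat.le_self_pow (Nat.succ_ne_zero f') _
    have hpow : (pvMaxSrcLen sm + 2) ^ (f'.succ + 1)
        = (pvMaxSrcLen sm + 2) * (pvMaxSrcLen sm + 2) ^ (f' + 1) := by
      rw [Nat.succ_add, pow_succ, Nat.mul_comm]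
    rw [hpow]
    have h2 : (rem.length + 1) * ((pvMaxSrcLen sm + 2) ^ (f' + 1) + 1)
        ≤ pvMaxSrcLen sm * ((pvMaxSrcLen sm + 2) ^ (f' + 1) + 1) :=
      Nat.mul_le_mul_right _ hlen
    nlinarith [hX, h2]
  · exact Nat.lt_add_of_pos_left (by positivity)
  · nlinarith [pow_pos (show 0 < pvMaxSrcLen sm + 2 by omega) (f + 1)]

def find_root_inputs_alt (id_to_trace : String) (sources_map : List (String × List String)) (memo : Option (List (String × List String))) (path_guard : Option (List String)) : List String :=
  (pvRunB (PySem.Dict.mk sources_map) [.visit (sources_map.length + 1) id_to_trace] []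
    (PySem.Dict.mk (memo.getD [])) (path_guard.getD [])).1

-- ===== PRECONDITION & SPEC =====
-- no Pre_: the ports agree on every input (Python A is total on well-typed input)
def Spec_find_root_inputs (id_to_trace : String) (sources_map : List (String × List String)) (memo : Option (List (String × List String))) (path_guard : Option (List String)) (out : List String) : Prop := out = find_root_inputs_alt id_to_trace sources_map memo path_guard
instance (id_to_trace : String) (sources_map : List (String × List String)) (memo : Option (List (String × List String))) (path_guard : Option (List String)) (out : List String) : Decidable (Spec_find_root_inputs id_to_trace sources_map memo path_guard out) := by unfold Spec_find_root_inputs; infer_instance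

-- ===== CLAIM (what is proved, stated in full; the proofs are below) =====
def Claim_equal_find_root_inputs : Prop := ∀ (id_to_trace : String) (sources_map : List (String × List String)) (memo : Option (List (String × List String))) (path_guard : Option (List String)), Dom_find_root_inputs id_to_trace sources_map memo path_guard → Spec_find_root_inputs id_to_trace sources_map memo path_guard (find_root_inputs id_to_trace sources_map memo path_guard)

-- ===== LEMMAS AND PROOFS =====

-- A removes the id it just appended to the guard: net effect none (the guard check failed, so id was absent)
theorem pvDiscardAppend (g : PySem.Set String) (id : String)
    (hmem : id ∉ g) :
    PySem.Set.discard (g ++ [id]) id = g := by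
  simp only [PySem.Set.discard, List.filter_append]
  rw [List.filter_eq_self.mpr, List.filter_singleton]
  · simp
  · intro a ha
    simp only [Bool.not_eq_eq_eq_not, Bool.not_true, beq_eq_false_iff_ne, ne_eq]
    exact fun e => hmem (e ▸ ha)

-- machine simulation: a fold frame runs A's source loop
theorem pvSimFold (sm : PySem.Dict String (List String)) (f : Nat)
    (ih : ∀ id st res m g, pvRunB sm (PvFrame.visit f id :: st) res m g =
      pvRunB sm st (pvTraceA sm f id m g).1 (pvTraceA sm f id m g).2.1 (pvTraceA sm f id m g).2.2) :
    ∀ (rem : List String) (id : String) (acc : List String) (st : List PvFrame)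
      (res : List String) (m : PySem.Dict String (List String)) (g : PySem.Set String),
      pvRunB sm (PvFrame.fold f id rem acc :: st) res m g =
        pvRunB sm st (pvTraceListA sm f rem (PySem.Set.update acc res) m g).1
          ((pvTraceListA sm f rem (PySem.Set.update acc res) m g).2.1.insert id
            (pvTraceListA sm f rem (PySem.Set.update acc res) m g).1)
          (PySem.Set.discard (pvTraceListA sm f rem (PySem.Set.update acc res) m g).2.2 id) := by
  intro rem
  induction rem with
  | nil =>
    intro id acc st res m g
    rw [pvRunB, pvTraceListA]
  | cons s rem' ihr =>
    intro id acc st res m g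
    rw [pvRunB, ih, ihr, pvTraceListA]

-- machine simulation: a visit frame runs one recursive call of A
theorem pvSim (sm : PySem.Dict String (List String)) :
    ∀ (f : Nat) (id : String) (st : List PvFrame) (res : List String)
      (m : PySem.Dict String (List String)) (g : PySem.Set String),
      pvRunB sm (PvFrame.visit f id :: st) res m g =
        pvRunB sm st (pvTraceA sm f id m g).1 (pvTraceA sm f id m g).2.1 (pvTraceA sm f id m g).2.2 := by
  intro f
  induction f with
  | zero =>
    intro id st res m g
    rw [pvRunB, pvTraceA]
    rcases hm : m.get? id with _ | v
    · by_cases hg : id ∈ g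
      · simp [hg]
      · rcases hs : sm.get? id with _ | (_ | ⟨s, rem⟩)
        · simp [hg, pvDiscardAppend g id hg]
        · simp [hg, pvDiscardAppend g id hg]
        · simp [hg]
    · simp
  | succ f ih =>
    intro id st res m g
    rw [pvRunB, pvTraceA]
    rcases hm : m.get? id with _ | v
    · by_cases hg : id ∈ g
      · simp [hg]
      · rcases hs : sm.get? id with _ | (_ | ⟨s, rem⟩)
        · simp [hg, pvDiscardAppend g id hg]
        · simp [hg, pvDiscardAppend g id hg]
        · simp only
          rw [ih, pvSimFold sm f ih, pvTraceListA]
          simp [hg]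
    · simp

-- ===== VERDICT (by name: the statement is the Claim_ definition above) =====
theorem find_root_inputs_spec : Claim_equal_find_root_inputs := by
  intro id sm memo guard _
  unfold Spec_find_root_inputs find_root_inputs find_root_inputs_alt
  rw [pvSim]
  rw [pvRunB]
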